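-- pv_equiv track=rewrite | github.com/AndySchw/Raspi-GPS | scripts/test_final_working.py | create_test_pattern
-- ===== SOURCE A (Python) =====
-- def create_test_pattern(width, height):
--     """
--     Erstelle EINFACHES Test-Muster:
--     - Komplette linke Hälfte: SCHWARZ
--     - Komplette rechte Hälfte: ROT
--     """
--     bytes_per_line = width // 8
--     total_bytes = bytes_per_line * height
--
--     black_data = []
--     red_data = []
--
--     for y in range(height):
--         for x_byte in range(bytes_per_line):
--             # Linke Hälfte: Schwarz
--             # Rechte Hälfte: Weiß (damit Rot sichtbar wird)
--             if x_byte < bytes_per_line // 2: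
--                 black_data.append(0x00)  # Schwarz
--                 red_data.append(0xFF)    # Transparent
--             else:
--                 black_data.append(0xFF)  # Weiß
--                 red_data.append(0x00)    # Rot
--
--     return black_data, red_data
-- ===== SOURCE B (Python) =====
-- def create_test_pattern(width, height):
--     bytes_per_line = width // 8
--     if bytes_per_line <= 0 or height <= 0:
--         return [], []
--     half = bytes_per_line // 2
--     black_row = [0x00] * half + [0xFF] * (bytes_per_line - half)
--     red_row = [0xFF] * half + [0x00] * (bytes_per_line - half)
--     return black_row * height, red_row * height
-- ===== Notes on version B (the rewrite author's own statement) =====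
-- stated objective: simpler
-- what changed: B builds the single repeating row once via list replication and duplicates it height times with list multiplication, instead of re-deciding every byte in a nested height x bytes_per_line loop with a per-byte branch.
import Mathlib
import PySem

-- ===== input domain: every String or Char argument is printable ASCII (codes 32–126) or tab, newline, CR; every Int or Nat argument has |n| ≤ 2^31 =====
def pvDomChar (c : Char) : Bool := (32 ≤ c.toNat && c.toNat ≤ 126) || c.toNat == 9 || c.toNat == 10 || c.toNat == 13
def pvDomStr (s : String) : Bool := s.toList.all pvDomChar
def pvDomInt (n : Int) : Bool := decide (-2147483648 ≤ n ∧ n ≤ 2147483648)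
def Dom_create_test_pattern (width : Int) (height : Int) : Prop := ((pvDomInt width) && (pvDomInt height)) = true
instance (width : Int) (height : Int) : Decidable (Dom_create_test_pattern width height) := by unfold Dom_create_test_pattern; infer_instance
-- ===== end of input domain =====

-- B builds the single repeating row once by replication and duplicates it height times,
-- instead of A's nested per-byte loop; objective: simpler.

-- ===== PORT A =====
def create_test_pattern (width : Int) (height : Int) : List Int × List Int :=
  let bytes_per_line := PySem.Int.floordiv width 8
  (PySem.List.pyRange 0 height 1).foldl
    (fun (st : List Int × List Int) _y =>
      (PySem.List.pyRange 0 bytes_per_line 1).foldl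
        (fun (st2 : List Int × List Int) x_byte =>
          if x_byte < PySem.Int.floordiv bytes_per_line 2 then
            (st2.1 ++ [0x00], st2.2 ++ [0xFF])
          else
            (st2.1 ++ [0xFF], st2.2 ++ [0x00])) st)
    (([] : List Int), ([] : List Int))

-- ===== PORT B =====
def create_test_pattern_alt (width : Int) (height : Int) : List Int × List Int :=
  let bytes_per_line := PySem.Int.floordiv width 8
  if bytes_per_line ≤ 0 ∨ height ≤ 0 then ([], [])
  else
    let half := PySem.Int.floordiv bytes_per_line 2
    let black_row := List.replicate half.toNat (0x00 : Int) ++ List.replicate (bytes_per_line - half).toNat (0xFF : Int)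
    let red_row := List.replicate half.toNat (0xFF : Int) ++ List.replicate (bytes_per_line - half).toNat (0x00 : Int)
    ((List.replicate height.toNat black_row).flatten, (List.replicate height.toNat red_row).flatten)

-- ===== PRECONDITION & SPEC =====
def Spec_create_test_pattern (width : Int) (height : Int) (out : List Int × List Int) : Prop := out = create_test_pattern_alt width height
instance (width : Int) (height : Int) (out : List Int × List Int) : Decidable (Spec_create_test_pattern width height out) := by unfold Spec_create_test_pattern; infer_instance

-- ===== CLAIM (what is proved, stated in full; the proofs are below) =====
def Claim_equal_create_test_pattern : Prop := ∀ (width : Int) (height : Int), Dom_create_test_pattern width height → Spec_create_test_pattern width height (create_test_pattern width height)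

-- ===== LEMMAS AND PROOFS =====

-- The inner loop over range(m) with threshold h appends one row to each accumulator.
theorem inner_row (a b : Int) (h m : Nat) (st : List Int × List Int) :
    ((List.range m).map (fun k : Nat => (k : Int))).foldl
      (fun (st2 : List Int × List Int) x_byte =>
        if x_byte < (h : Int) then (st2.1 ++ [a], st2.2 ++ [b]) else (st2.1 ++ [b], st2.2 ++ [a])) st
    = (st.1 ++ List.replicate (min m h) a ++ List.replicate (m - h) b,
       st.2 ++ List.replicate (min m h) b ++ List.replicate (m - h) a) := by
  induction m generalizing st with
  | zero => simp
  | succ n ih =>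
    rw [List.range_succ]
    rw [List.map_append]
    rw [List.foldl_append]
    rw [ih]
    by_cases hn : n < h
    · have h1 : min n h = n := by omega
      have h2 : min (n + 1) h = n + 1 := by omega
      have h3 : n - h = 0 := by omega
      have h4 : n + 1 - h = 0 := by omega
      simp [h1, h3, h4, hn, List.replicate_succ']
    · have h1 : min n h = h := by omega
      have h2 : min (n + 1) h = h := by omega
      have h3 : n + 1 - h = (n - h) + 1 := by omega
      have hn' : ¬ ((n : Int) < (h : Int)) := by exact_mod_cast hn
      simp [h1, h2, h3, hn', List.replicate_succ', List.append_assoc]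

-- The outer loop appends one copy of each row per iteration, regardless of the index.
theorem outer_rep (rB rR : List Int) (l : List Int) (st : List Int × List Int) :
    l.foldl (fun (st : List Int × List Int) _ => (st.1 ++ rB, st.2 ++ rR)) st
    = (st.1 ++ (List.replicate l.length rB).flatten, st.2 ++ (List.replicate l.length rR).flatten) := by
  induction l generalizing st with
  | nil => simp
  | cons x xs ih => simp [ih, List.replicate_succ, List.append_assoc]

theorem create_test_pattern_spec : Claim_equal_create_test_pattern := by
  unfold Claim_equal_create_test_pattern Spec_create_test_pattern
  intro width height _
  unfold create_test_pattern create_test_pattern_alt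
  set bpl := PySem.Int.floordiv width 8 with hbpl
  by_cases h0 : bpl ≤ 0 ∨ height ≤ 0
  · simp only [h0, if_true]
    rcases h0 with h0 | h0
    · have : PySem.List.pyRange 0 bpl 1 = [] := PySem.List.pyRange_one_eq_nil (by omega)
      simp [this]
    · have : PySem.List.pyRange 0 height 1 = [] := PySem.List.pyRange_one_eq_nil (by omega)
      simp [this]
  · simp only [h0, if_false]
    push Not at h0
    obtain ⟨hb, hh⟩ := h0
    set half := PySem.Int.floordiv bpl 2 with hhalf
    have hhe : half = bpl / 2 := PySem.Int.floordiv_eq_ediv_of_pos (by omega)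
    have hhb : 0 ≤ half ∧ half ≤ bpl := by rw [hhe]; omega
    have hcast : PySem.List.pyRange 0 bpl 1 = (List.range bpl.toNat).map (fun k : Nat => (k : Int)) := by
      rw [PySem.List.pyRange_one]; simp [List.map_eq_flatMap]
    have hmin : min bpl.toNat half.toNat = half.toNat := by omega
    have hsub : bpl.toNat - half.toNat = (bpl - half).toNat := by omega
    have hcond : ∀ (x : Int), (x < half) = (x < (half.toNat : Int)) := by
      intro x; rw [Int.toNat_of_nonneg hhb.1]
    have inner : ∀ st : List Int × List Int,
        (PySem.List.pyRange 0 bpl 1).foldl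
          (fun (st2 : List Int × List Int) x_byte =>
            if x_byte < half then (st2.1 ++ [0x00], st2.2 ++ [0xFF])
            else (st2.1 ++ [0xFF], st2.2 ++ [0x00])) st
        = (st.1 ++ (List.replicate half.toNat (0x00:Int) ++ List.replicate (bpl - half).toNat (0xFF:Int)),
           st.2 ++ (List.replicate half.toNat (0xFF:Int) ++ List.replicate (bpl - half).toNat (0x00:Int))) := by
      intro st
      rw [hcast]
      simp only [hcond]
      rw [inner_row (0x00) (0xFF) half.toNat bpl.toNat st]
      rw [hmin, hsub, List.append_assoc, List.append_assoc]
    have houter := outer_rep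
      (List.replicate half.toNat (0x00:Int) ++ List.replicate (bpl - half).toNat (0xFF:Int))
      (List.replicate half.toNat (0xFF:Int) ++ List.replicate (bpl - half).toNat (0x00:Int))
      (PySem.List.pyRange 0 height 1) ([], [])
    have hlen : (PySem.List.pyRange 0 height 1).length = height.toNat := by
      rw [PySem.List.length_pyRange_one]; simp
    have hcong : ∀ (l : List Int) (st : List Int × List Int),
        l.foldl
          (fun (st : List Int × List Int) _y =>
            (PySem.List.pyRange 0 bpl 1).foldl
              (fun (st2 : List Int × List Int) x_byte =>
                if x_byte < half then (st2.1 ++ [0x00], st2.2 ++ [0xFF])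
                else (st2.1 ++ [0xFF], st2.2 ++ [0x00])) st) st
        = l.foldl
            (fun (st : List Int × List Int) _y =>
              (st.1 ++ (List.replicate half.toNat (0x00:Int) ++ List.replicate (bpl - half).toNat (0xFF:Int)),
               st.2 ++ (List.replicate half.toNat (0xFF:Int) ++ List.replicate (bpl - half).toNat (0x00:Int)))) st := by
      intro l
      induction l with
      | nil => intro st; rfl
      | cons x xs ih => intro st; simp only [List.foldl_cons]; rw [inner]; exact ih _
    rw [hcong, houter, hlen]
    simp
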